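-- pv_equiv track=rewrite | github.com/es-ude/denspp.offline | 3_Python/src_fpga/helper/translater.py | generate_params_list
-- ===== SOURCE A (Python) =====
-- def chck_key_in_list_available(key_chck: str, library: list) -> list:
--     """Function for checking if key is in library available
--     Args:
--         key_chck:   String with key for checking and adding to library
--         library:    Library with keys
--     Return:
--         List of library
--     """
--     # --- Checking if key in list is available
--     value_avai = False
--     for key in library:
--         if key_chck in key:
--             value_avai = True
--             break
--     # --- Generate output
--     if not value_avai:
--         library.append(key_chck)
--     return library
--
-- def generate_params_list(template_list: list, old_library_list=None) -> list:
--     """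
--     Function for generating a parameter list from template files
--     Args:
--         template_list:      List with template for extracting parameters
--         old_library_list:   List with old parameters [Default: None -> Generate new list]
--     Returns:
--         List with common parameters
--     """
--     new_params_list = old_library_list if old_library_list is not None else list()
--
--     for line in template_list:
--         if '{$' in line:
--             overview_split = line.split('{$')
--             for split_param in overview_split[1:]:
--                 param_search = split_param.split('}')[0]
--                 new_params_list = chck_key_in_list_available(param_search, new_params_list)
--
--     return new_params_list
-- ===== SOURCE B (Python) =====
-- def generate_params_list(template_list, old_library_list=None):
--     # Character-level scanner: instead of splitting each line on '{$' and '}',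
--     # walk the line once with an index, detect '{$' markers in place and read the
--     # parameter name up to the closing '}' (or the next '{$' marker / end of line).
--     library = old_library_list if old_library_list is not None else []
--     for line in template_list:
--         n = len(line)
--         i = 0
--         while i < n:
--             if line[i] == '{' and i + 1 < n and line[i + 1] == '$':
--                 j = i + 2
--                 while j < n and line[j] != '}' and not (line[j] == '{' and j + 1 < n and line[j + 1] == '$'):
--                     j += 1
--                 p = line[i + 2:j]
--                 if not any(p in key for key in library):
--                     library.append(p)
--                 i = j + 1 if j < n and line[j] == '}' else j
--             else:
--                 i += 1
--     return library
-- ===== Notes on version B (the rewrite author's own statement) =====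
-- stated objective: alternative
-- what changed: Replaces A's split('{$')/split('}') string-splitting with a single character-level index scan per line: a state machine that detects '{$' markers in place and reads each parameter name up to its closing '}' (or the next marker / end of line), instead of building and traversing segment lists.
import Mathlib
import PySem

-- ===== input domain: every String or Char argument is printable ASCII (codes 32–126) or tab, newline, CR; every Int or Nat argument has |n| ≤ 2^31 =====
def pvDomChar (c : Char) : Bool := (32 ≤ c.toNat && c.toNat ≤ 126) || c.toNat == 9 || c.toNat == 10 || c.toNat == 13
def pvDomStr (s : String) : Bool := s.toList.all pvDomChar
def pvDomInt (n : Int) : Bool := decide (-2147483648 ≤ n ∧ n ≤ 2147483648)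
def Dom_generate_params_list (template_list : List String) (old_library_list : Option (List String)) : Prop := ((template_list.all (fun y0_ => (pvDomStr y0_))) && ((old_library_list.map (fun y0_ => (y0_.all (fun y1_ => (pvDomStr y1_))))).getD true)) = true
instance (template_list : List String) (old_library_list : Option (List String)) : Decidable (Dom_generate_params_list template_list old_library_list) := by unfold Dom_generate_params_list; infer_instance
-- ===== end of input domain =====

-- B replaces A's split-based parsing by a single character-level index scan per line; both A and B
-- mutate old_library_list in place — the equivalence proved here is about the return value.
-- ===== PORT A =====
-- the break-loop of chck_key_in_list_available, as structural recursion
def chckAvaiLoop (key_chck : String) : List String → Bool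
  | [] => false
  | key :: rest => if PySem.Str.isIn key_chck key then true else chckAvaiLoop key_chck rest

def chck_key_in_list_available (key_chck : String) (library : List String) : List String :=
  let value_avai := chckAvaiLoop key_chck library
  if value_avai = false then library ++ [key_chck] else library

def generate_params_list (template_list : List String) (old_library_list : Option (List String)) : List String :=
  let new_params_list := match old_library_list with | some l => l | none => []
  template_list.foldl (fun new_params_list line =>
    if PySem.Str.isIn "{$" line then
      (((PySem.Str.split? line "{$").getD []).drop 1).foldl (fun new_params_list split_param =>
        let param_search := ((PySem.Str.split? split_param "}").getD []).headD ""
        chck_key_in_list_available param_search new_params_list) new_params_list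
    else new_params_list) new_params_list

-- ===== PORT B =====
-- append p unless it is a substring of an existing entry (B's inline any() test)
def addParam (library : List String) (p : String) : List String :=
  if library.any (fun key => PySem.Str.isIn p key) then library else library ++ [p]

-- B's inner while loop: the param chars up to '}' (consumed), a new '{$' marker, or end of line,
-- together with the position the outer scan resumes at
def takeParam : List Char → List Char × List Char
  | [] => ([], [])
  | c :: rest =>
    if c = '}' then ([], rest)
    else if c = '{' ∧ rest.head? = some '$' then ([], c :: rest)
    else
      let pr := takeParam rest
      (c :: pr.1, pr.2)

theorem takeParam_snd_length : ∀ cs : List Char, (takeParam cs).2.length ≤ cs.length := by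
  intro cs
  induction cs with
  | nil => simp [takeParam]
  | cons c rest ih =>
    simp only [takeParam]
    split_ifs with h1 h2
    · simp
    · simp
    · simpa using Nat.le_succ_of_le ih

-- B's outer while loop: skip a plain char, or consume a '{$' marker and the param after it
def scanLine (lib : List String) : List Char → List String
  | [] => lib
  | c :: rest =>
    if c = '{' ∧ rest.head? = some '$' then
      let pr := takeParam rest.tail
      scanLine (addParam lib (String.ofList pr.1)) pr.2
    else scanLine lib rest
termination_by cs => cs.length
decreasing_by
  · exact Nat.lt_succ_of_le ((takeParam_snd_length _).trans (rest.length_tail ▸ Nat.sub_le _ _))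
  · simp

def generate_params_list_alt (template_list : List String) (old_library_list : Option (List String)) : List String :=
  let library := match old_library_list with | some l => l | none => []
  template_list.foldl (fun library line => scanLine library line.toList) library

-- ===== PRECONDITION & SPEC =====
def Spec_generate_params_list (template_list : List String) (old_library_list : Option (List String)) (out : List String) : Prop := out = generate_params_list_alt template_list old_library_list
instance (template_list : List String) (old_library_list : Option (List String)) (out : List String) : Decidable (Spec_generate_params_list template_list old_library_list out) := by unfold Spec_generate_params_list; infer_instance

-- ===== CLAIM (what is proved, stated in full; the proofs are below) =====
def Claim_equal_generate_params_list : Prop := ∀ (template_list : List String) (old_library_list : Option (List String)), Dom_generate_params_list template_list old_library_list → Spec_generate_params_list template_list old_library_list (generate_params_list template_list old_library_list)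

-- ===== LEMMAS AND PROOFS =====

-- A's membership loop with break = the any() test
theorem chckAvaiLoop_eq_any (k : String) (lib : List String) :
    chckAvaiLoop k lib = lib.any (fun key => PySem.Str.isIn k key) := by
  induction lib with
  | nil => rfl
  | cons x xs ih =>
    simp only [chckAvaiLoop, List.any_cons, ih]
    cases h : PySem.Str.isIn k x <;> simp

theorem chck_eq_addParam (k : String) (lib : List String) :
    chck_key_in_list_available k lib = addParam lib k := by
  simp only [chck_key_in_list_available, addParam, chckAvaiLoop_eq_any]
  cases h : lib.any (fun key => PySem.Str.isIn k key) <;> simp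

-- the invariant of PySem.Chars.splitOn's fuelled loop: the accumulators factor out
theorem splitOn_go_inv (sep : List Char) (hsep : sep ≠ []) :
    ∀ n l, List.length l ≤ n → ∀ fuel cur acc, l.length + 1 ≤ fuel →
      PySem.Chars.splitOn.go sep fuel l cur acc
        = acc.reverse ++ (PySem.Chars.splitOn l sep).modifyHead (fun t => cur.reverse ++ t) := by
  intro n
  induction n with
  | zero =>
    intro l hl fuel cur acc h1
    have : l = [] := List.length_eq_zero_iff.mp (Nat.le_zero.mp hl)
    subst this
    obtain ⟨g, rfl⟩ : ∃ g, fuel = g + 1 := ⟨fuel - 1, by omega⟩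
    rw [PySem.Chars.splitOn.go]
    · simp [PySem.Chars.splitOn, PySem.Chars.splitOn.go]
    · omega
  | succ n ih =>
    intro l hl fuel cur acc h1
    cases l with
    | nil =>
      obtain ⟨g, rfl⟩ : ∃ g, fuel = g + 1 := ⟨fuel - 1, by omega⟩
      rw [PySem.Chars.splitOn.go]
      · simp [PySem.Chars.splitOn, PySem.Chars.splitOn.go]
      · omega
    | cons c rest =>
      obtain ⟨g, rfl⟩ : ∃ g, fuel = g + 1 := ⟨fuel - 1, by omega⟩
      simp only [List.length_cons] at hl h1
      have hsl : 1 ≤ sep.length := List.length_pos_iff.mpr hsep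
      rw [PySem.Chars.splitOn.go]
      have hsplit : PySem.Chars.splitOn (c :: rest) sep
          = PySem.Chars.splitOn.go sep (rest.length + 2) (c :: rest) [] [] := by
        rw [PySem.Chars.splitOn]; simp
      by_cases hp : sep.isPrefixOf (c :: rest)
      · have hle : sep.length ≤ rest.length + 1 := by
          simpa using (List.IsPrefix.length_le (List.isPrefixOf_iff_prefix.mp hp))
        have hdl : ((c :: rest).drop sep.length).length = rest.length + 1 - sep.length := by simp
        rw [if_pos hp]
        rw [ih ((c :: rest).drop sep.length) (by omega) g [] (cur.reverse :: acc) (by omega)]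
        rw [hsplit, PySem.Chars.splitOn.go]
        rw [if_pos hp]
        simp only [List.reverse_nil]
        rw [ih ((c :: rest).drop sep.length) (by omega) (rest.length + 1) [] [[]] (by omega)]
        cases hE : PySem.Chars.splitOn ((c :: rest).drop sep.length) sep with
        | nil => simp
        | cons a t => simp
      · rw [if_neg hp]
        rw [ih rest (by omega) g (c :: cur) acc (by omega)]
        rw [hsplit, PySem.Chars.splitOn.go]
        rw [if_neg hp]
        rw [ih rest (by omega) (rest.length + 1) [c] [] (by omega)]
        cases hE : PySem.Chars.splitOn rest sep with
        | nil => simp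
        | cons a t => simp

-- the three recursion equations of splitOn
theorem splitOn_nil (sep : List Char) : PySem.Chars.splitOn [] sep = [[]] := rfl

theorem splitOn_prefix {sep : List Char} {c : Char} {rest : List Char}
    (hsep : sep ≠ []) (h : sep.isPrefixOf (c :: rest)) :
    PySem.Chars.splitOn (c :: rest) sep = [] :: PySem.Chars.splitOn ((c :: rest).drop sep.length) sep := by
  have hsl : 1 ≤ sep.length := List.length_pos_iff.mpr hsep
  have hle : sep.length ≤ rest.length + 1 := by
    simpa using (List.IsPrefix.length_le (List.isPrefixOf_iff_prefix.mp h))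
  have hdl : ((c :: rest).drop sep.length).length = rest.length + 1 - sep.length := by simp
  have hsplit : PySem.Chars.splitOn (c :: rest) sep
      = PySem.Chars.splitOn.go sep (rest.length + 2) (c :: rest) [] [] := by
    rw [PySem.Chars.splitOn]; simp
  rw [hsplit, PySem.Chars.splitOn.go, if_pos h]
  simp only [List.reverse_nil]
  rw [splitOn_go_inv sep hsep ((c :: rest).drop sep.length).length _ le_rfl (rest.length + 1) [] [[]]
    (by omega)]
  cases hE : PySem.Chars.splitOn ((c :: rest).drop sep.length) sep with
  | nil => simp
  | cons a t => simp

theorem splitOn_not_prefix {sep : List Char} {c : Char} {rest : List Char}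
    (h : ¬ sep.isPrefixOf (c :: rest)) :
    PySem.Chars.splitOn (c :: rest) sep = (PySem.Chars.splitOn rest sep).modifyHead (fun t => c :: t) := by
  have hsep : sep ≠ [] := by
    rintro rfl; exact h (by simp [List.isPrefixOf])
  have hsplit : PySem.Chars.splitOn (c :: rest) sep
      = PySem.Chars.splitOn.go sep (rest.length + 2) (c :: rest) [] [] := by
    rw [PySem.Chars.splitOn]; simp
  rw [hsplit, PySem.Chars.splitOn.go, if_neg h]
  rw [splitOn_go_inv sep hsep rest.length _ le_rfl (rest.length + 1) [c] [] (by omega)]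
  cases hE : PySem.Chars.splitOn rest sep with
  | nil => simp
  | cons a t => simp

theorem splitOn_ne_nil {sep : List Char} (hsep : sep ≠ []) (l : List Char) :
    PySem.Chars.splitOn l sep ≠ [] := by
  induction l with
  | nil => simp [splitOn_nil]
  | cons c rest ih =>
    by_cases hp : sep.isPrefixOf (c :: rest)
    · rw [splitOn_prefix hsep hp]; simp
    · rw [splitOn_not_prefix hp]
      obtain ⟨a, t, hE⟩ := List.ne_nil_iff_exists_cons.mp ih
      rw [hE]; simp

-- no occurrence of sep ⇒ a single segment
theorem splitOn_drop_one_of_not_infix {sep : List Char} :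
    ∀ l : List Char, ¬ sep <:+: l → (PySem.Chars.splitOn l sep).drop 1 = [] := by
  intro l
  induction l with
  | nil => intro _; simp [splitOn_nil]
  | cons c rest ih =>
    intro hni
    by_cases hp : sep.isPrefixOf (c :: rest)
    · exact absurd (List.IsPrefix.isInfix (List.isPrefixOf_iff_prefix.mp hp)) hni
    · rw [splitOn_not_prefix hp, List.drop_one, List.tail_modifyHead, ← List.drop_one]
      exact ih (fun h => hni (List.infix_cons h))

-- decoding the '{$' marker test as a prefix test
theorem marker_prefix_iff (c : Char) (rest : List Char) :
    (['{', '$'].isPrefixOf (c :: rest) = true) ↔ (c = '{' ∧ rest.head? = some '$') := by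
  cases rest
  · simp [List.isPrefixOf]
  · simp [List.isPrefixOf]; aesop

-- the per-segment step of A, expressed on the char level
def stepSeg (lib : List String) (seg : List Char) : List String :=
  addParam lib (String.ofList ((PySem.Chars.splitOn seg ['}']).headD []))

-- takeParam's param = the part of the first '{$'-segment before its first '}'
theorem takeParam_fst : ∀ cs : List Char,
    (takeParam cs).1 = (PySem.Chars.splitOn ((PySem.Chars.splitOn cs ['{', '$']).headD []) ['}']).headD [] := by
  intro cs
  induction cs with
  | nil => rfl
  | cons c rest ih =>
    simp only [takeParam]
    split_ifs with h1 h2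
    · -- c = '}'
      subst h1
      have hnp : ¬ (['{', '$'].isPrefixOf ('}' :: rest)) := by
        rw [marker_prefix_iff]; rintro ⟨h, -⟩; exact absurd h (by decide)
      rw [splitOn_not_prefix hnp]
      obtain ⟨a, t, hE⟩ := List.ne_nil_iff_exists_cons.mp (splitOn_ne_nil (by decide) rest (sep := ['{', '$']))
      rw [hE]
      have hp2 : (['}'] : List Char).isPrefixOf ('}' :: a) := by simp [List.isPrefixOf]
      simp only [List.modifyHead_cons, List.headD_cons]
      rw [splitOn_prefix (by decide) hp2]
      rfl
    · -- marker '{$'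
      obtain ⟨rfl, hh⟩ := h2
      have hp : (['{', '$'] : List Char).isPrefixOf ('{' :: rest) := (marker_prefix_iff _ _).mpr ⟨rfl, hh⟩
      rw [splitOn_prefix (by decide) hp]
      rfl
    · -- plain char
      have hnp : ¬ (['{', '$'].isPrefixOf (c :: rest)) := by rw [marker_prefix_iff]; exact h2
      rw [splitOn_not_prefix hnp]
      obtain ⟨a, t, hE⟩ := List.ne_nil_iff_exists_cons.mp (splitOn_ne_nil (by decide) rest (sep := ['{', '$']))
      rw [hE]
      rw [hE] at ih
      simp only [List.headD_cons] at ih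
      have hnp2 : ¬ ((['}'] : List Char).isPrefixOf (c :: a)) := by
        simp [List.isPrefixOf]; intro h; exact h1 h.symm
      simp only [List.modifyHead_cons, List.headD_cons]
      rw [splitOn_not_prefix hnp2]
      obtain ⟨b, u, hE2⟩ := List.ne_nil_iff_exists_cons.mp (splitOn_ne_nil (by decide) a (sep := ['}']))
      rw [hE2]
      rw [hE2] at ih
      simp only [List.modifyHead_cons, List.headD_cons] at ih ⊢
      rw [ih]

-- B's scanner = A's fold over the '{$'-segments (outer state, and state after a marker)
theorem scan_eq_split : ∀ n cs, List.length cs ≤ n → ∀ lib : List String,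
    (scanLine lib cs = ((PySem.Chars.splitOn cs ['{', '$']).drop 1).foldl stepSeg lib) ∧
    (scanLine lib (takeParam cs).2 = ((PySem.Chars.splitOn cs ['{', '$']).drop 1).foldl stepSeg lib) := by
  intro n
  induction n with
  | zero =>
    intro cs hcs lib
    have : cs = [] := List.length_eq_zero_iff.mp (Nat.le_zero.mp hcs)
    subst this
    constructor <;> (show scanLine lib [] = _; rw [scanLine, splitOn_nil]; rfl)
  | succ n ih =>
    intro cs hcs lib
    cases cs with
    | nil => constructor <;> (show scanLine lib [] = _; rw [scanLine, splitOn_nil]; rfl)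
    | cons c rest =>
      simp only [List.length_cons] at hcs
      by_cases hm : c = '{' ∧ rest.head? = some '$'
      · obtain ⟨rfl, hh⟩ := hm
        cases rest with
        | nil => simp at hh
        | cons d rest' =>
          simp only [List.head?_cons, Option.some.injEq] at hh
          subst hh
          simp only [List.length_cons] at hcs
          have hp : (['{', '$'] : List Char).isPrefixOf ('{' :: '$' :: rest') := by
            simp [List.isPrefixOf]
          have hsplit := splitOn_prefix (by decide) hp
          simp only [List.length_cons, List.drop_succ_cons] at hsplit
          have key : scanLine lib ('{' :: '$' :: rest')
              = (PySem.Chars.splitOn rest' ['{', '$']).foldl stepSeg lib := by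
            rw [scanLine]
            rw [if_pos ⟨rfl, rfl⟩]
            simp only [List.tail_cons]
            rw [(ih rest' (by omega) _).2]
            obtain ⟨a, t, hE⟩ := List.ne_nil_iff_exists_cons.mp
              (splitOn_ne_nil (by decide) rest' (sep := ['{', '$']))
            rw [takeParam_fst rest', hE]
            simp only [List.headD_cons, List.drop_succ_cons, List.drop_zero, List.foldl_cons]
            rfl
          constructor
          · rw [key, hsplit]
            simp
          · -- takeParam ('{' :: …) leaves the input in place
            have : (takeParam ('{' :: '$' :: rest')).2 = '{' :: '$' :: rest' := by
              simp [takeParam]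
            rw [this, key, hsplit]
            simp
      · have hnp : ¬ (['{', '$'].isPrefixOf (c :: rest)) := by rw [marker_prefix_iff]; exact hm
        have hdrop : (PySem.Chars.splitOn (c :: rest) ['{', '$']).drop 1
            = (PySem.Chars.splitOn rest ['{', '$']).drop 1 := by
          rw [splitOn_not_prefix hnp, List.drop_one, List.tail_modifyHead, ← List.drop_one]
        constructor
        · rw [scanLine, if_neg hm, hdrop]
          exact (ih rest (by omega) lib).1
        · rw [hdrop]
          by_cases hc : c = '}'
          · have : (takeParam (c :: rest)).2 = rest := by simp [takeParam, hc]
            rw [this]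
            exact (ih rest (by omega) lib).1
          · have : (takeParam (c :: rest)).2 = (takeParam rest).2 := by
              simp [takeParam, hc, hm]
            rw [this]
            exact (ih rest (by omega) lib).2

-- per-line equality of A's body and B's scanner
theorem line_eq (lib : List String) (line : String) :
    (if PySem.Str.isIn "{$" line then
      (((PySem.Str.split? line "{$").getD []).drop 1).foldl (fun l s =>
        chck_key_in_list_available (((PySem.Str.split? s "}").getD []).headD "") l) lib
    else lib) = scanLine lib line.toList := by
  rw [(scan_eq_split line.toList.length line.toList le_rfl lib).1]
  by_cases h : PySem.Str.isIn "{$" line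
  · rw [if_pos h]
    have hsplit : PySem.Str.split? line "{$"
        = some ((PySem.Chars.splitOn line.toList ['{', '$']).map String.ofList) := by
      simp [PySem.Str.split?, PySem.Chars.split?]
    rw [hsplit]
    simp only [Option.getD_some, ← List.map_drop, List.foldl_map]
    congr 1
    funext l s
    rw [chck_eq_addParam]
    unfold stepSeg
    congr 1
    have hsplit2 : PySem.Str.split? (String.ofList s) "}"
        = some ((PySem.Chars.splitOn s ['}']).map String.ofList) := by
      simp [PySem.Str.split?, PySem.Chars.split?]
    rw [hsplit2]
    obtain ⟨b, u, hE⟩ := List.ne_nil_iff_exists_cons.mp (splitOn_ne_nil (by decide) s (sep := ['}']))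
    rw [hE]
    simp
  · rw [if_neg h]
    have hni : ¬ (['{', '$'] : List Char) <:+: line.toList := by
      intro hin
      exact h ((PySem.Str.isIn_iff_infix "{$" line).mpr hin)
    rw [splitOn_drop_one_of_not_infix line.toList hni]
    rfl

-- ===== VERDICT (by name: the statement is the Claim_ definition above) =====
theorem generate_params_list_spec : Claim_equal_generate_params_list := by
  intro tl ol _
  unfold Spec_generate_params_list generate_params_list generate_params_list_alt
  simp only [line_eq]
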